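-- pv_equiv track=rewrite | github.com/jun048098/codingtest | programmers/LV2/방금그곡.py | solution
-- ===== SOURCE A (Python) =====
-- def solution(m, musicinfos):
--     answer= []
--     m =m.replace('C#','c').replace('D#', 'd').replace('F#', 'f').replace('G#', 'g').replace('A#', 'a')
--
--     for idx, info in enumerate(musicinfos):
--         start, end, name, melody = info.split(',')
--         time = (60*int(end[:2]) +int(end[3:])) - (60*int(start[:2]) + int(start[3:]))
--         melody = melody.replace('C#','c').replace('D#', 'd').replace('F#', 'f').replace('G#', 'g').replace('A#', 'a')
--
--         melody = melody * (time // len(melody)) +melody[:time % len(melody)]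
--         new_melody = ''.join(melody)
--
--         if m in new_melody:
--             answer.append((idx, time, name) )
--
--     if len(answer)==0:
--         return "(None)"
--     else:
--         answer= sorted(answer, key= lambda x :( -x[1], x[0]))
--         return answer[0][-1]
-- ===== SOURCE B (Python) =====
-- def _canon_scan(s):
--     # one left-to-right pass: 'X#' (X in CDFGA) becomes lowercase x
--     out = []
--     i = 0
--     n = len(s)
--     while i < n:
--         if i + 1 < n and s[i + 1] == '#' and s[i] in 'CDFGA':
--             out.append(s[i].lower())
--             i += 2
--         else:
--             out.append(s[i])
--             i += 1
--     return ''.join(out)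
--
--
-- def _mins(hhmm):
--     return 60 * int(hhmm[:2]) + int(hhmm[3:])
--
--
-- def solution(m, musicinfos):
--     target = _canon_scan(m)
--     best = None  # (time, name) of the best match so far
--     for info in musicinfos:
--         fields = info.split(',')
--         dur = _mins(fields[1]) - _mins(fields[0])
--         mel = _canon_scan(fields[3])
--         q, r = divmod(dur, len(mel))
--         if target in mel * q + mel[:r] and (best is None or dur > best[0]):
--             best = (dur, fields[2])
--     return "(None)" if best is None else best[1]
-- ===== Notes on version B (the rewrite author's own statement) =====
-- stated objective: simpler
-- what changed: B replaces A's five chained str.replace passes by a single left-to-right scanner for the sharp notes, parses each line into indexed fields with a minutes helper and divmod, and keeps one running best (time, name) updated on strict '>' instead of collecting all matches and sorting by (-time, idx).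
import Mathlib
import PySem

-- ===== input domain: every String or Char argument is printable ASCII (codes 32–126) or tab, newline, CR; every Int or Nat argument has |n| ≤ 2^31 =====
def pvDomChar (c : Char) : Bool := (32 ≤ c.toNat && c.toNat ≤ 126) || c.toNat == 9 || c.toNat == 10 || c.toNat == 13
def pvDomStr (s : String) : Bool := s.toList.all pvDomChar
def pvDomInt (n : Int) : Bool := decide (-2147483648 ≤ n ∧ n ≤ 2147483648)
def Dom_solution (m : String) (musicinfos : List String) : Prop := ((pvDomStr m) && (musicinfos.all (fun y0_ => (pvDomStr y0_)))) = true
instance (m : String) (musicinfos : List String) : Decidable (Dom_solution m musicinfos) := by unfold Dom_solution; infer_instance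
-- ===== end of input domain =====

-- B replaces A's five chained str.replace passes by one left-to-right sharp-note scanner, parses
-- lines by field indexing with a minutes helper and divmod, and keeps a one-pass running best
-- (time, name) under strict '>' instead of collecting all matches and sorting (objective: simpler).


-- ===== PORT A =====
-- A's chain of five str.replace calls
def noteSub (s : String) : String :=
  PySem.Str.replace (PySem.Str.replace (PySem.Str.replace (PySem.Str.replace
    (PySem.Str.replace s "C#" "c") "D#" "d") "F#" "f") "G#" "g") "A#" "a"

-- A's loop body: split the info line by unpacking, compute the play time from the two HH:MM
-- fields, build melody * (time // len(melody)) + melody[:time % len(melody)] (''.join of a str is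
-- that str) and return (time, name) iff m occurs in it; none where Python's unpacking/int()/len
-- raises (excluded by Pre_solution below)
def melodyHit (m info : String) : Option (Int × String) :=
  match (PySem.Str.split? info ",").getD [] with
  | [start, stop, name, melody] =>
      let time : Int :=
        (60 * (PySem.Int.ofStr? (PySem.Str.slice stop none (some 2))).getD 0
           + (PySem.Int.ofStr? (PySem.Str.slice stop (some 3) none)).getD 0)
        - (60 * (PySem.Int.ofStr? (PySem.Str.slice start none (some 2))).getD 0
           + (PySem.Int.ofStr? (PySem.Str.slice start (some 3) none)).getD 0)
      let mel := noteSub melody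
      let played := String.ofList
        (PySem.List.pyRepeat mel.toList (PySem.Int.floordiv time (mel.toList.length : Int)) ++
         (PySem.Str.slice mel none (some (PySem.Int.mod time (mel.toList.length : Int)))).toList)
      if PySem.Str.isIn m played then some (time, name) else none
  | _ => none

def solution (m : String) (musicinfos : List String) : String :=
  let m' := noteSub m
  let answer : List (Int × Int × String) :=
    (PySem.List.enumerate musicinfos).foldl (fun acc p =>
      match melodyHit m' p.2 with
      | some r => acc ++ [(p.1, r.1, r.2)]
      | none => acc) []
  if answer.length = 0 then "(None)"
  else
    match PySem.List.sorted2 answer (fun x => -x.2.1) (fun x => x.1) with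
    | [] => "(None)"   -- unreachable: sorted2 of a nonempty list
    | top :: _ => top.2.2

-- ===== PORT B =====
-- Source B _canon_scan's while loop as the obvious structural recursion on the char list:
-- consume 'X#' (X in CDFGA) as one lowercased char, otherwise copy one char
def scanCanon : List Char → List Char
  | [] => []
  | [c] => [c]
  | c1 :: c2 :: t =>
      if c2 = '#' ∧ (c1 = 'C' ∨ c1 = 'D' ∨ c1 = 'F' ∨ c1 = 'G' ∨ c1 = 'A') then
        PySem.Chars.lowerChar c1 :: scanCanon t
      else
        c1 :: scanCanon (c2 :: t)

def canonScan (s : String) : String := String.ofList (scanCanon s.toList)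

-- Source B _mins
def minsOf (hhmm : String) : Int :=
  60 * (PySem.Int.ofStr? (String.ofList (PySem.List.slice hhmm.toList none (some 2)))).getD 0
    + (PySem.Int.ofStr? (String.ofList (PySem.List.slice hhmm.toList (some 3) none))).getD 0

-- the loop body of Source B's for-loop
def bStep (target : String) (best : Option (Int × String)) (info : String) : Option (Int × String) :=
    let fields := (PySem.Str.split? info ",").getD []
    let dur := minsOf ((PySem.List.pyGet? fields 1).getD "") - minsOf ((PySem.List.pyGet? fields 0).getD "")
    let mel := canonScan ((PySem.List.pyGet? fields 3).getD "")
    let qr := (PySem.Int.divmod? dur (mel.toList.length : Int)).getD (0, 0)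
    let played := PySem.List.pyRepeat mel.toList qr.1 ++ PySem.List.slice mel.toList none (some qr.2)
    if PySem.Chars.isIn target.toList played &&
        (match best with | none => true | some b => decide (b.1 < dur)) then
      some (dur, (PySem.List.pyGet? fields 2).getD "")
    else best

def solution_alt (m : String) (musicinfos : List String) : String :=
  let target := canonScan m
  let best := musicinfos.foldl (bStep target) none
  match best with
  | none => "(None)"
  | some b => b.2

-- ===== PRECONDITION & SPEC =====
-- Python A raises on an info line unless it splits on ',' into exactly 4 fields (else the
-- unpacking raises ValueError), the four time slices parse as int() (else ValueError), and the
-- melody field is nonempty (else ZeroDivisionError on len); Pre_ admits exactly the other inputs.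
def okInfo (info : String) : Bool :=
  match (PySem.Str.split? info ",").getD [] with
  | [start, stop, _, melody] =>
      (PySem.Int.ofStr? (PySem.Str.slice stop none (some 2))).isSome &&
      (PySem.Int.ofStr? (PySem.Str.slice stop (some 3) none)).isSome &&
      (PySem.Int.ofStr? (PySem.Str.slice start none (some 2))).isSome &&
      (PySem.Int.ofStr? (PySem.Str.slice start (some 3) none)).isSome &&
      !(melody == "")
  | _ => false

def Pre_solution (m : String) (musicinfos : List String) : Prop :=
  ∀ info ∈ musicinfos, okInfo info = true
instance (m : String) (musicinfos : List String) : Decidable (Pre_solution m musicinfos) := by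
  unfold Pre_solution; infer_instance

def pvWitness_solution : String × List String := ("ABC", ["12:00,12:14,WORLD,ABCDEF"])

def Spec_solution (m : String) (musicinfos : List String) (out : String) : Prop :=
  out = solution_alt m musicinfos
instance (m : String) (musicinfos : List String) (out : String) : Decidable (Spec_solution m musicinfos out) := by
  unfold Spec_solution; infer_instance

-- ===== CLAIM (what is proved, stated in full; the proofs are below) =====
def Claim_equal_solution : Prop := ∀ (m : String) (musicinfos : List String), Dom_solution m musicinfos → Pre_solution m musicinfos → Spec_solution m musicinfos (solution m musicinfos)

-- ===== LEMMAS AND PROOFS =====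

-- ---- 1. the two note canonicalisations agree ----

-- clean recursion computing Python's s.replace(a+b, r) for a 2-char pattern
def rep2 (a b r : Char) : List Char → List Char
  | [] => []
  | [c] => [c]
  | c1 :: c2 :: t =>
      if c1 = a ∧ c2 = b then r :: rep2 a b r t else c1 :: rep2 a b r (c2 :: t)

lemma rep2_cons_step (a b r x : Char) (ys : List Char)
    (h : x ≠ a ∨ ys.head? ≠ some b) : rep2 a b r (x :: ys) = x :: rep2 a b r ys := by
  cases ys with
  | nil => rfl
  | cons y ys' =>
      have : ¬ (x = a ∧ y = b) := by
        rintro ⟨rfl, rfl⟩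
        rcases h with h | h
        · exact h rfl
        · exact h rfl
      simp [rep2, this]

lemma rep2_match (a b r : Char) (t : List Char) :
    rep2 a b r (a :: b :: t) = r :: rep2 a b r t := by simp [rep2]

lemma go_eq (a b r : Char) :
    ∀ (fuel : Nat) (l acc : List Char), l.length ≤ fuel →
      PySem.Chars.replace.go [a, b] [r] fuel l acc = acc.reverse ++ rep2 a b r l := by
  intro fuel
  induction fuel with
  | zero =>
      intro l acc h
      have hl : l = [] := List.eq_nil_of_length_eq_zero (Nat.le_zero.mp h)
      subst hl
      rw [PySem.Chars.replace.go.eq_def]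
      simp [rep2]
  | succ n ih =>
      intro l acc h
      rw [PySem.Chars.replace.go.eq_def]
      cases l with
      | nil => simp [rep2]
      | cons c t =>
          simp only []
          by_cases hp : [a, b].isPrefixOf (c :: t) = true
          · obtain ⟨u, hu⟩ := List.isPrefixOf_iff_prefix.mp hp
            have hu' : a :: b :: u = c :: t := hu
            injection hu' with h1 h2
            subst h1
            subst h2
            simp only [hp, if_true]
            have hlen : u.length ≤ n := by
              simp only [List.length_cons] at h; omega
            have hdrop : List.drop [a, b].length (a :: b :: u) = u := rfl
            rw [hdrop, ih _ _ hlen, rep2_match]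
            simp
          · simp only [hp]
            have hlen : t.length ≤ n := by simp at h; omega
            rw [ih _ _ hlen]
            have hstep : rep2 a b r (c :: t) = c :: rep2 a b r t := by
              apply rep2_cons_step
              by_cases hc : c = a
              · right
                intro hh
                apply hp
                subst hc
                cases t with
                | nil => simp at hh
                | cons d t' =>
                    simp at hh
                    subst hh
                    simp [List.isPrefixOf]
              · left; exact hc
            rw [hstep]
            simp

lemma replace_eq_rep2 (a b r : Char) (l : List Char) :
    PySem.Chars.replace l [a, b] [r] = rep2 a b r l := by
  rw [PySem.Chars.replace]
  simp only [List.isEmpty_cons, if_false, Bool.false_eq_true]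
  have := go_eq a b r l.length l [] le_rfl
  simpa using this

-- A's chain of the five replaces, on the char list
def chainRep (l : List Char) : List Char :=
  rep2 'A' '#' 'a' (rep2 'G' '#' 'g' (rep2 'F' '#' 'f' (rep2 'D' '#' 'd' (rep2 'C' '#' 'c' l))))

lemma head_ne_of (a r : Char) (hr : r ≠ '#') (xs : List Char)
    (h : ∀ c, xs.head? = some c → c ≠ '#') :
    ∀ c, (rep2 a '#' r xs).head? = some c → c ≠ '#' := by
  intro c hc
  cases xs with
  | nil => simp [rep2] at hc
  | cons y ys =>
      cases ys with
      | nil =>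
          simp [rep2] at hc
          subst hc
          exact h _ (by simp)
      | cons y2 ys2 =>
          by_cases hm : y = a ∧ y2 = '#'
          · obtain ⟨h1, h2⟩ := hm
            subst h1; subst h2
            rw [rep2_match] at hc
            simp at hc
            subst hc
            exact hr
          · have hstep : y ≠ a ∨ (y2 :: ys2).head? ≠ some '#' := by
              by_cases hy : y = a
              · right; simp only [List.head?_cons, ne_eq, Option.some.injEq]
                intro h2; exact hm ⟨hy, h2⟩
              · left; exact hy
            rw [rep2_cons_step _ _ _ _ _ hstep] at hc
            simp at hc
            subst hc
            exact h _ (by simp)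

lemma chain_step (c1 c2 : Char) (t : List Char)
    (h : ¬(c2 = '#' ∧ (c1 = 'C' ∨ c1 = 'D' ∨ c1 = 'F' ∨ c1 = 'G' ∨ c1 = 'A'))) :
    chainRep (c1 :: c2 :: t) = c1 :: chainRep (c2 :: t) := by
  unfold chainRep
  by_cases hs : c2 = '#'
  · have hc : ¬(c1 = 'C' ∨ c1 = 'D' ∨ c1 = 'F' ∨ c1 = 'G' ∨ c1 = 'A') := fun hcc => h ⟨hs, hcc⟩
    simp only [not_or] at hc
    rw [rep2_cons_step 'C' '#' 'c' c1 _ (Or.inl hc.1),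
        rep2_cons_step 'D' '#' 'd' c1 _ (Or.inl hc.2.1),
        rep2_cons_step 'F' '#' 'f' c1 _ (Or.inl hc.2.2.1),
        rep2_cons_step 'G' '#' 'g' c1 _ (Or.inl hc.2.2.2.1),
        rep2_cons_step 'A' '#' 'a' c1 _ (Or.inl hc.2.2.2.2)]
  · have h0 : ∀ c, (c2 :: t).head? = some c → c ≠ '#' := by
      intro c hc; simp at hc; subst hc; exact hs
    have h1 := head_ne_of 'C' 'c' (by decide) _ h0
    have h2 := head_ne_of 'D' 'd' (by decide) _ h1
    have h3 := head_ne_of 'F' 'f' (by decide) _ h2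
    have h4 := head_ne_of 'G' 'g' (by decide) _ h3
    have ne_of : ∀ (xs : List Char), (∀ c, xs.head? = some c → c ≠ '#') → xs.head? ≠ some '#' :=
      fun xs hx hh => hx '#' hh rfl
    rw [rep2_cons_step 'C' '#' 'c' c1 _ (Or.inr (ne_of _ h0)),
        rep2_cons_step 'D' '#' 'd' c1 _ (Or.inr (ne_of _ h1)),
        rep2_cons_step 'F' '#' 'f' c1 _ (Or.inr (ne_of _ h2)),
        rep2_cons_step 'G' '#' 'g' c1 _ (Or.inr (ne_of _ h3)),
        rep2_cons_step 'A' '#' 'a' c1 _ (Or.inr (ne_of _ h4))]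

lemma chain_matchC (t : List Char) : chainRep ('C' :: '#' :: t) = 'c' :: chainRep t := by
  unfold chainRep
  rw [rep2_match,
      rep2_cons_step 'D' '#' 'd' 'c' _ (Or.inl (by decide)),
      rep2_cons_step 'F' '#' 'f' 'c' _ (Or.inl (by decide)),
      rep2_cons_step 'G' '#' 'g' 'c' _ (Or.inl (by decide)),
      rep2_cons_step 'A' '#' 'a' 'c' _ (Or.inl (by decide))]

lemma chain_matchD (t : List Char) : chainRep ('D' :: '#' :: t) = 'd' :: chainRep t := by
  unfold chainRep
  rw [rep2_cons_step 'C' '#' 'c' 'D' _ (Or.inl (by decide)),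
      rep2_cons_step 'C' '#' 'c' '#' _ (Or.inl (by decide)),
      rep2_match,
      rep2_cons_step 'F' '#' 'f' 'd' _ (Or.inl (by decide)),
      rep2_cons_step 'G' '#' 'g' 'd' _ (Or.inl (by decide)),
      rep2_cons_step 'A' '#' 'a' 'd' _ (Or.inl (by decide))]

lemma chain_matchF (t : List Char) : chainRep ('F' :: '#' :: t) = 'f' :: chainRep t := by
  unfold chainRep
  rw [rep2_cons_step 'C' '#' 'c' 'F' _ (Or.inl (by decide)),
      rep2_cons_step 'C' '#' 'c' '#' _ (Or.inl (by decide)),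
      rep2_cons_step 'D' '#' 'd' 'F' _ (Or.inl (by decide)),
      rep2_cons_step 'D' '#' 'd' '#' _ (Or.inl (by decide)),
      rep2_match,
      rep2_cons_step 'G' '#' 'g' 'f' _ (Or.inl (by decide)),
      rep2_cons_step 'A' '#' 'a' 'f' _ (Or.inl (by decide))]

lemma chain_matchG (t : List Char) : chainRep ('G' :: '#' :: t) = 'g' :: chainRep t := by
  unfold chainRep
  rw [rep2_cons_step 'C' '#' 'c' 'G' _ (Or.inl (by decide)),
      rep2_cons_step 'C' '#' 'c' '#' _ (Or.inl (by decide)),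
      rep2_cons_step 'D' '#' 'd' 'G' _ (Or.inl (by decide)),
      rep2_cons_step 'D' '#' 'd' '#' _ (Or.inl (by decide)),
      rep2_cons_step 'F' '#' 'f' 'G' _ (Or.inl (by decide)),
      rep2_cons_step 'F' '#' 'f' '#' _ (Or.inl (by decide)),
      rep2_match,
      rep2_cons_step 'A' '#' 'a' 'g' _ (Or.inl (by decide))]

lemma chain_matchA (t : List Char) : chainRep ('A' :: '#' :: t) = 'a' :: chainRep t := by
  unfold chainRep
  rw [rep2_cons_step 'C' '#' 'c' 'A' _ (Or.inl (by decide)),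
      rep2_cons_step 'C' '#' 'c' '#' _ (Or.inl (by decide)),
      rep2_cons_step 'D' '#' 'd' 'A' _ (Or.inl (by decide)),
      rep2_cons_step 'D' '#' 'd' '#' _ (Or.inl (by decide)),
      rep2_cons_step 'F' '#' 'f' 'A' _ (Or.inl (by decide)),
      rep2_cons_step 'F' '#' 'f' '#' _ (Or.inl (by decide)),
      rep2_cons_step 'G' '#' 'g' 'A' _ (Or.inl (by decide)),
      rep2_cons_step 'G' '#' 'g' '#' _ (Or.inl (by decide)),
      rep2_match]

lemma scan_eq_chain : ∀ (n : Nat) (l : List Char), l.length ≤ n → scanCanon l = chainRep l := by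
  intro n
  induction n with
  | zero =>
      intro l h
      have hl : l = [] := List.eq_nil_of_length_eq_zero (Nat.le_zero.mp h)
      subst hl; rfl
  | succ n ih =>
      intro l h
      cases l with
      | nil => rfl
      | cons c1 t0 =>
          cases t0 with
          | nil => rfl
          | cons c2 t =>
              by_cases hm : c2 = '#' ∧ (c1 = 'C' ∨ c1 = 'D' ∨ c1 = 'F' ∨ c1 = 'G' ∨ c1 = 'A')
              · obtain ⟨hs, hc⟩ := hm
                subst hs
                have hlt : t.length ≤ n := by simp only [List.length_cons] at h; omega
                rcases hc with rfl | rfl | rfl | rfl | rfl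
                · rw [chain_matchC]; simp [scanCanon, ih t hlt]; decide
                · rw [chain_matchD]; simp [scanCanon, ih t hlt]; decide
                · rw [chain_matchF]; simp [scanCanon, ih t hlt]; decide
                · rw [chain_matchG]; simp [scanCanon, ih t hlt]; decide
                · rw [chain_matchA]; simp [scanCanon, ih t hlt]; decide
              · rw [chain_step c1 c2 t hm]
                have hlt : (c2 :: t).length ≤ n := by simp only [List.length_cons] at h ⊢; omega
                simp only [scanCanon, if_neg hm]
                rw [ih _ hlt]

lemma canonList_eq (l : List Char) : scanCanon l = chainRep l :=
  scan_eq_chain l.length l le_rfl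

lemma noteSub_toList (s : String) : (noteSub s).toList = scanCanon s.toList := by
  unfold noteSub
  simp only [PySem.Str.replace, String.toList_ofList]
  have hC : ("C#" : String).toList = ['C', '#'] := rfl
  have hD : ("D#" : String).toList = ['D', '#'] := rfl
  have hF : ("F#" : String).toList = ['F', '#'] := rfl
  have hG : ("G#" : String).toList = ['G', '#'] := rfl
  have hA : ("A#" : String).toList = ['A', '#'] := rfl
  rw [hC, hD, hF, hG, hA]
  have hc : ("c" : String).toList = ['c'] := rfl
  have hd : ("d" : String).toList = ['d'] := rfl
  have hf : ("f" : String).toList = ['f'] := rfl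
  have hg : ("g" : String).toList = ['g'] := rfl
  have ha : ("a" : String).toList = ['a'] := rfl
  rw [hc, hd, hf, hg, ha]
  rw [replace_eq_rep2, replace_eq_rep2, replace_eq_rep2, replace_eq_rep2, replace_eq_rep2]
  exact (canonList_eq s.toList).symm

lemma canon_eq (s : String) : canonScan s = noteSub s := by
  have := noteSub_toList s
  unfold canonScan
  rw [← this]
  exact String.ofList_toList

-- ---- 2. scanCanon of a nonempty list is nonempty ----
lemma scanCanon_ne_nil (l : List Char) (h : l ≠ []) : scanCanon l ≠ [] := by
  cases l with
  | nil => exact absurd rfl h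
  | cons c1 t0 =>
      cases t0 with
      | nil => simp [scanCanon]
      | cons c2 t => simp only [scanCanon]; split <;> simp

-- ---- 3. B's loop body equals A's melodyHit-based step, on lines Pre_ admits ----
lemma branch_eq (hit : Bool) (d : Int) (nm : String) (best : Option (Int × String)) :
    (if (hit && (match best with | none => true | some b => decide (b.1 < d))) = true
       then some (d, nm) else best)
    = (match (if hit = true then some (d, nm) else none : Option (Int × String)) with
       | some r => (match best with
                    | none => some r
                    | some bb => if bb.1 < r.1 then some r else best)
       | none => best) := by
  cases hit with
  | false => cases best <;> simp
  | true =>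
      cases best with
      | none => simp
      | some bb => by_cases hlt : bb.1 < d <;> simp [hlt]

lemma divmod_getD_fst (d L : Int) (hL : L ≠ 0) :
    ((PySem.Int.divmod? d L).getD (0, 0)).1 = PySem.Int.floordiv d L := by
  simp [PySem.Int.divmod?, hL, PySem.Int.floordiv]

lemma divmod_getD_snd (d L : Int) (hL : L ≠ 0) :
    ((PySem.Int.divmod? d L).getD (0, 0)).2 = PySem.Int.mod d L := by
  simp [PySem.Int.divmod?, hL, PySem.Int.mod]

def stepB (m' : String) (b : Option (Int × String)) (info : String) : Option (Int × String) :=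
  match melodyHit m' info with
  | some r => match b with | none => some r | some bb => if bb.1 < r.1 then some r else b
  | none => b

set_option maxHeartbeats 2000000 in
lemma step_bridge (m : String) (best : Option (Int × String)) (info : String)
    (h : okInfo info = true) :
    bStep (canonScan m) best info = stepB (noteSub m) best info := by
  unfold okInfo at h
  unfold bStep stepB melodyHit
  cases hfs : (PySem.Str.split? info ",").getD [] with
  | nil => rw [hfs] at h; simp at h
  | cons s0 t0 =>
    cases t0 with
    | nil => rw [hfs] at h; simp at h
    | cons s1 t1 =>
      cases t1 with
      | nil => rw [hfs] at h; simp at h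
      | cons s2 t2 =>
        cases t2 with
        | nil => rw [hfs] at h; simp at h
        | cons s3 t3 =>
          cases t3 with
          | cons s4 t4 => rw [hfs] at h; simp at h
          | nil =>
            rw [hfs] at h
            simp only [Bool.and_eq_true, Bool.not_eq_true', beq_eq_false_iff_ne] at h
            obtain ⟨⟨⟨⟨_, _⟩, _⟩, _⟩, hmelne⟩ := h
            simp only [hfs]
            -- field accesses
            have g0 : (PySem.List.pyGet? [s0, s1, s2, s3] (0 : Int)).getD "" = s0 := by
              simp [PySem.List.pyGet?, PySem.List.pyIdx?]
            have g1 : (PySem.List.pyGet? [s0, s1, s2, s3] (1 : Int)).getD "" = s1 := by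
              simp [PySem.List.pyGet?, PySem.List.pyIdx?]
            have g2 : (PySem.List.pyGet? [s0, s1, s2, s3] (2 : Int)).getD "" = s2 := by
              simp [PySem.List.pyGet?, PySem.List.pyIdx?]
            have g3 : (PySem.List.pyGet? [s0, s1, s2, s3] (3 : Int)).getD "" = s3 := by
              simp [PySem.List.pyGet?, PySem.List.pyIdx?]
            rw [g0, g1, g2, g3]
            -- minutes
            have hmins : ∀ s : String, minsOf s =
                60 * (PySem.Int.ofStr? (PySem.Str.slice s none (some 2))).getD 0
                  + (PySem.Int.ofStr? (PySem.Str.slice s (some 3) none)).getD 0 := by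
              intro s
              unfold minsOf
              simp [PySem.Str.slice, PySem.Chars.slice_eq_listSlice]
            rw [hmins, hmins]
            -- canon
            rw [canon_eq s3, canon_eq m]
            -- melody nonempty, so divmod? is some
            have hne : (noteSub s3).toList ≠ [] := by
              rw [noteSub_toList]
              apply scanCanon_ne_nil
              intro hnil
              apply hmelne
              have := congrArg String.ofList hnil
              rwa [String.ofList_toList] at this
            have hL : ((noteSub s3).toList.length : Int) ≠ 0 := by
              have hn : (noteSub s3).toList.length ≠ 0 := by
                intro h0; exact hne (List.eq_nil_of_length_eq_zero h0)
              exact_mod_cast hn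
            rw [divmod_getD_fst _ _ hL, divmod_getD_snd _ _ hL]
            -- the membership test
            have hplayed : ∀ q r : Int,
                PySem.Chars.isIn (noteSub m).toList
                  (PySem.List.pyRepeat (noteSub s3).toList q ++
                   PySem.List.slice (noteSub s3).toList none (some r))
                = PySem.Str.isIn (noteSub m)
                    (String.ofList
                      (PySem.List.pyRepeat (noteSub s3).toList q ++
                       (PySem.Str.slice (noteSub s3) none (some r)).toList)) := by
              intro q r
              simp [PySem.Str.isIn, PySem.Str.slice, PySem.Chars.slice_eq_listSlice, String.toList_ofList]
            generalize ((60 * (PySem.Int.ofStr? (PySem.Str.slice s1 none (some 2))).getD 0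
                 + (PySem.Int.ofStr? (PySem.Str.slice s1 (some 3) none)).getD 0)
              - (60 * (PySem.Int.ofStr? (PySem.Str.slice s0 none (some 2))).getD 0
                 + (PySem.Int.ofStr? (PySem.Str.slice s0 (some 3) none)).getD 0) : Int) = d
            rw [hplayed]
            generalize (PySem.Str.isIn (noteSub m)
              (String.ofList
                (PySem.List.pyRepeat (noteSub s3).toList (PySem.Int.floordiv d ((noteSub s3).toList.length : Int)) ++
                 (PySem.Str.slice (noteSub s3) none (some (PySem.Int.mod d ((noteSub s3).toList.length : Int)))).toList)) : Bool) = hit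
            exact branch_eq hit d s2 best

-- ---- 4. A's collect-then-sort selection equals the running best (from the sorted head) ----

-- the strict 'comes before' relation sorted2 uses for key (-time, idx)
def beforeA (a b : Int × Int × String) : Bool :=
  decide ((-a.2.1 : Int) < -b.2.1) || (!decide ((-b.2.1 : Int) < -a.2.1) && decide (a.1 < b.1))

lemma sorted2_eq_foldl (xs : List (Int × Int × String)) :
    PySem.List.sorted2 xs (fun x => -x.2.1) (fun x => x.1) =
      xs.foldl (fun acc x => PySem.List.insertBy beforeA x acc) [] := rfl

-- running-head update: what inserting x does to the head of the list
def upd (s : Option (Int × Int × String)) (x : Int × Int × String) : Option (Int × Int × String) :=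
  some (match s with | none => x | some y => if beforeA x y then x else y)

lemma head?_insertBy (x : Int × Int × String) (acc : List (Int × Int × String)) :
    (PySem.List.insertBy beforeA x acc).head? = upd acc.head? x := by
  cases acc with
  | nil => rfl
  | cons y ys =>
      simp only [PySem.List.insertBy, upd, List.head?_cons]
      split <;> simp_all

lemma head?_foldl_insertBy :
    ∀ (xs : List (Int × Int × String)) (acc : List (Int × Int × String)),
      (xs.foldl (fun a x => PySem.List.insertBy beforeA x a) acc).head? = xs.foldl upd acc.head? := by
  intro xs
  induction xs with
  | nil => intro acc; rfl
  | cons x t ih =>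
      intro acc
      simp only [List.foldl_cons, ih, head?_insertBy]

-- the matches A collects, processed from index i on
def matchesFrom (m' : String) (i : Int) : List String → List (Int × Int × String)
  | [] => []
  | info :: rest =>
      match melodyHit m' info with
      | some r => (i, r.1, r.2) :: matchesFrom m' (i + 1) rest
      | none => matchesFrom m' (i + 1) rest

lemma answer_eq (m' : String) :
    ∀ (L : List String) (i : Int) (acc : List (Int × Int × String)),
      (PySem.List.enumerate L i).foldl (fun acc p =>
        match melodyHit m' p.2 with
        | some r => acc ++ [(p.1, r.1, r.2)]
        | none => acc) acc = acc ++ matchesFrom m' i L := by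
  intro L
  induction L with
  | nil => intro i acc; simp [PySem.List.enumerate_nil, matchesFrom]
  | cons info rest ih =>
      intro i acc
      rw [PySem.List.enumerate_cons, List.foldl_cons]
      simp only [matchesFrom]
      cases h : melodyHit m' info with
      | none => simp only [ih]
      | some r => simp only [ih, List.append_assoc, List.singleton_append]

def liftP : Option (Int × Int × String) → Option (Int × String) :=
  Option.map (fun t => (t.2.1, t.2.2))

-- core: over matches with indices ≥ i, the head-of-sorted fold projects to B's running best
lemma main_fold (m' : String) :
    ∀ (L : List String) (i : Int) (s : Option (Int × Int × String)),
      (∀ t, s = some t → t.1 < i) →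
      liftP ((matchesFrom m' i L).foldl upd s) = L.foldl (stepB m') (liftP s) := by
  intro L
  induction L with
  | nil => intro i s _; rfl
  | cons info rest ih =>
      intro i s hs
      simp only [matchesFrom, List.foldl_cons]
      cases h : melodyHit m' info with
      | none =>
          have hstep : stepB m' (liftP s) info = liftP s := by simp [stepB, h]
          rw [hstep]
          exact ih (i + 1) s (fun t ht => by have := hs t ht; omega)
      | some r =>
          simp only [List.foldl_cons]
          have hstep : stepB m' (liftP s) info =
              liftP (upd s (i, r.1, r.2)) := by
            cases s with
            | none => simp [stepB, h, upd, liftP]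
            | some y =>
                have hy : y.1 < i := hs y rfl
                have hb : beforeA (i, r.1, r.2) y = decide (y.2.1 < r.1) := by
                  simp only [beforeA]
                  have : decide ((i : Int) < y.1) = false := by
                    simp only [decide_eq_false_iff_not]; omega
                  rw [this]
                  by_cases hlt : y.2.1 < r.1
                  · simp [hlt]
                  · have h1 : ¬ (-r.1 : Int) < -y.2.1 := by omega
                    simp [hlt, h1]
                simp only [stepB, h, upd, hb, liftP, Option.map_some]
                by_cases hlt : y.2.1 < r.1 <;> simp [hlt]
          rw [hstep]
          apply ih (i + 1)
          intro t ht
          cases s with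
          | none =>
              have h2 : (i, r.1, r.2) = t := by simpa [upd] using ht
              subst h2; simp
          | some y =>
              have hy : y.1 < i := hs y rfl
              simp only [upd, Option.some.injEq] at ht
              split at ht
              · subst ht; simp
              · subst ht; omega

lemma foldl_upd_some :
    ∀ (xs : List (Int × Int × String)) (s : Int × Int × String),
      ∃ w, xs.foldl upd (some s) = some w := by
  intro xs
  induction xs with
  | nil => intro s; exact ⟨s, rfl⟩
  | cons x t ih =>
      intro s
      simp only [List.foldl_cons, upd]
      exact ih _

-- ===== VERDICT (by name: the statement is the Claim_ definition above) =====
theorem solution_spec : Claim_equal_solution := by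
  intro m musicinfos _hdom hpre
  show solution m musicinfos = solution_alt m musicinfos
  have halt : solution_alt m musicinfos =
      match musicinfos.foldl (stepB (noteSub m)) none with
      | none => "(None)"
      | some b => b.2 := by
    simp only [solution_alt]
    rw [PySem.List.foldl_congr_mem musicinfos (bStep (canonScan m)) (stepB (noteSub m)) none
      (fun acc x hx => step_bridge m acc x (hpre x hx))]
  rw [halt]
  simp only [solution]
  rw [answer_eq (noteSub m) musicinfos 0 [], List.nil_append]
  have hmain := main_fold (noteSub m) musicinfos 0 none (fun t ht => by cases ht)
  simp only [liftP, Option.map_none] at hmain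
  cases hM : matchesFrom (noteSub m) 0 musicinfos with
  | nil =>
      rw [hM] at hmain
      simp only [List.foldl_nil] at hmain
      rw [← hmain]
      rfl
  | cons a t =>
      rw [hM] at hmain
      have hlen : (a :: t).length ≠ 0 := by simp
      simp only [hlen, if_false]
      rw [sorted2_eq_foldl]
      obtain ⟨w, hw⟩ := foldl_upd_some t a
      have hfold : (a :: t).foldl upd none = some w := by
        simpa only [List.foldl_cons, upd] using hw
      have hhead : ((a :: t).foldl (fun acc x => PySem.List.insertBy beforeA x acc) []).head? = some w := by
        rw [head?_foldl_insertBy]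
        simpa using hfold
      rw [hfold] at hmain
      simp only [Option.map_some] at hmain
      cases hsrt : (a :: t).foldl (fun acc x => PySem.List.insertBy beforeA x acc) [] with
      | nil => rw [hsrt] at hhead; cases hhead
      | cons top rest =>
          rw [hsrt] at hhead
          simp only [List.head?_cons, Option.some.injEq] at hhead
          subst hhead
          rw [← hmain]
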